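-- pv_equiv track=rewrite | github.com/davidkartchner/biomedical-entity-linking | bioel/bioel/linking_eval.py | min_hit_index
-- ===== SOURCE A (Python) =====
-- def list_flatten(nested_list):
--     used = set([])
--     flattened = []
--     for x in nested_list:
--         for y in x:
--             if y not in used:
--                 flattened.append(y)
--                 used.add(y)
--
--     return flattened
--
-- def min_hit_index(gold_cuis, candidates, eval_mode):
--     """
--     Find index of first hit in candidates
--     """
--     if eval_mode == "basic":
--         flat_candidates = list_flatten(candidates)
--         for i, c in enumerate(flat_candidates):
--             if c in gold_cuis:
--                 return i
--     elif eval_mode == "strict":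
--         for i, c in enumerate(candidates):
--             if all(x in gold_cuis for x in c):
--                 return i
--
--     elif eval_mode == "relaxed":
--         for i, c in enumerate(candidates):
--             if any(x in gold_cuis for x in c):
--                 return i
--
--     else:
--         raise ValueError(f"eval_mode {eval_mode} not supported")
--
--     return 1000000
-- ===== SOURCE B (Python) =====
-- def min_hit_index(gold_cuis, candidates, eval_mode):
--     """
--     Find index of first hit in candidates
--     """
--     if eval_mode == "basic":
--         # single fused pass: dedup and scan the nested candidates without
--         # ever materializing the flattened list
--         seen = set()
--         idx = 0
--         for group in candidates:
--             for c in group: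
--                 if c in seen:
--                     continue
--                 seen.add(c)
--                 if c in gold_cuis:
--                     return idx
--                 idx += 1
--     elif eval_mode == "strict":
--         for i, c in enumerate(candidates):
--             if all(x in gold_cuis for x in c):
--                 return i
--     elif eval_mode == "relaxed":
--         for i, c in enumerate(candidates):
--             if any(x in gold_cuis for x in c):
--                 return i
--     else:
--         raise ValueError(f"eval_mode {eval_mode} not supported")
--
--     return 1000000
-- ===== Notes on version B (the rewrite author's own statement) =====
-- stated objective: simpler
-- what changed: The 'basic' branch no longer builds a deduplicated flat list via the list_flatten helper and then scans it; B streams the nested candidates in one fused pass with a seen-set and a running index, returning at the first unseen candidate found in gold_cuis, eliminating the helper and the intermediate list.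
import Mathlib
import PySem

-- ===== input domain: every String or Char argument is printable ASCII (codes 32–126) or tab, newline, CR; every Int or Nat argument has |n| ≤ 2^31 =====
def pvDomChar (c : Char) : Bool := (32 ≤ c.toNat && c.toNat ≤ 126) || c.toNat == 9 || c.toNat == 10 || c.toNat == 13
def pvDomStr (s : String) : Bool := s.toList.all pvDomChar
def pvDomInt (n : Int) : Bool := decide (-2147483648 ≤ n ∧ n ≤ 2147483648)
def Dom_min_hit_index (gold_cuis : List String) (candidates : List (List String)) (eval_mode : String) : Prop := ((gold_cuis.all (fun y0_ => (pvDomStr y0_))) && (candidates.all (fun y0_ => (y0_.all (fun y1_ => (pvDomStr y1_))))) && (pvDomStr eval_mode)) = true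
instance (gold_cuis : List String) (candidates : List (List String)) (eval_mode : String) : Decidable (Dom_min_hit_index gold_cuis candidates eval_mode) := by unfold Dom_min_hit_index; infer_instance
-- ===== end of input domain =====

-- B fuses A's list_flatten + scan of the "basic" branch into one streaming pass with a
-- seen-set and a running index (helper eliminated, no intermediate list); objective: simpler.

-- ===== PORT A =====
-- inner 'for y in x' loop of list_flatten, state (used, flattened)
def pvFlattenInner (used : PySem.Set String) (flattened : List String) : List String → PySem.Set String × List String
  | [] => (used, flattened)
  | y :: ys =>
    if PySem.Set.contains used y then pvFlattenInner used flattened ys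
    else pvFlattenInner (PySem.Set.add used y) (flattened ++ [y]) ys

-- outer 'for x in nested_list' loop of list_flatten
def pvFlattenOuter (used : PySem.Set String) (flattened : List String) : List (List String) → PySem.Set String × List String
  | [] => (used, flattened)
  | x :: xs =>
    let p := pvFlattenInner used flattened x
    pvFlattenOuter p.1 p.2 xs

def list_flatten (nested_list : List (List String)) : List String :=
  (pvFlattenOuter PySem.Set.empty [] nested_list).2

-- 'for i, c in enumerate(flat_candidates): if c in gold_cuis: return i' then 'return 1000000'
def pvScanA (gold_cuis : List String) (i : Int) : List String → Int
  | [] => 1000000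
  | c :: cs => if gold_cuis.contains c then i else pvScanA gold_cuis (i + 1) cs

-- strict loop (shared verbatim by both Pythons)
def pvStrict (gold_cuis : List String) (i : Int) : List (List String) → Int
  | [] => 1000000
  | c :: cs => if c.all (fun x => gold_cuis.contains x) then i else pvStrict gold_cuis (i + 1) cs

-- relaxed loop (shared verbatim by both Pythons)
def pvRelaxed (gold_cuis : List String) (i : Int) : List (List String) → Int
  | [] => 1000000
  | c :: cs => if c.any (fun x => gold_cuis.contains x) then i else pvRelaxed gold_cuis (i + 1) cs

def min_hit_index (gold_cuis : List String) (candidates : List (List String)) (eval_mode : String) : Int :=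
  if eval_mode == "basic" then pvScanA gold_cuis 0 (list_flatten candidates)
  else if eval_mode == "strict" then pvStrict gold_cuis 0 candidates
  else if eval_mode == "relaxed" then pvRelaxed gold_cuis 0 candidates
  else 0  -- Python raises ValueError here; excluded by Pre_min_hit_index

-- ===== PORT B =====
-- B's inner 'for c in group' loop: either an early return (.inl idx) or the updated (seen, idx)
def pvGroupScan (gold_cuis : List String) (seen : PySem.Set String) (idx : Int) : List String → Sum Int (PySem.Set String × Int)
  | [] => Sum.inr (seen, idx)
  | c :: cs =>
    if PySem.Set.contains seen c then pvGroupScan gold_cuis seen idx cs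
    else if gold_cuis.contains c then Sum.inl idx
    else pvGroupScan gold_cuis (PySem.Set.add seen c) (idx + 1) cs

-- B's outer 'for group in candidates' loop
def pvGoB (gold_cuis : List String) (seen : PySem.Set String) (idx : Int) : List (List String) → Int
  | [] => 1000000
  | g :: rest =>
    match pvGroupScan gold_cuis seen idx g with
    | Sum.inl i => i
    | Sum.inr (s, j) => pvGoB gold_cuis s j rest

def min_hit_index_alt (gold_cuis : List String) (candidates : List (List String)) (eval_mode : String) : Int :=
  if eval_mode == "basic" then pvGoB gold_cuis PySem.Set.empty 0 candidates
  else if eval_mode == "strict" then pvStrict gold_cuis 0 candidates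
  else if eval_mode == "relaxed" then pvRelaxed gold_cuis 0 candidates
  else 0  -- Python raises ValueError here; excluded by Pre_min_hit_index

-- ===== PRECONDITION & SPEC =====
-- Pre_ excludes exactly the eval_mode values on which A raises ValueError.
def Pre_min_hit_index (gold_cuis : List String) (candidates : List (List String)) (eval_mode : String) : Prop :=
  eval_mode = "basic" ∨ eval_mode = "strict" ∨ eval_mode = "relaxed"
instance (gold_cuis : List String) (candidates : List (List String)) (eval_mode : String) : Decidable (Pre_min_hit_index gold_cuis candidates eval_mode) := by unfold Pre_min_hit_index; infer_instance

def pvWitness_min_hit_index : List String × List (List String) × String := (["C1"], [["C0"], ["C1", "C2"]], "basic")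

def Spec_min_hit_index (gold_cuis : List String) (candidates : List (List String)) (eval_mode : String) (out : Int) : Prop := out = min_hit_index_alt gold_cuis candidates eval_mode
instance (gold_cuis : List String) (candidates : List (List String)) (eval_mode : String) (out : Int) : Decidable (Spec_min_hit_index gold_cuis candidates eval_mode out) := by unfold Spec_min_hit_index; infer_instance

-- ===== CLAIM (what is proved, stated in full; the proofs are below) =====
def Claim_equal_min_hit_index : Prop := ∀ (gold_cuis : List String) (candidates : List (List String)) (eval_mode : String), Dom_min_hit_index gold_cuis candidates eval_mode → Pre_min_hit_index gold_cuis candidates eval_mode → Spec_min_hit_index gold_cuis candidates eval_mode (min_hit_index gold_cuis candidates eval_mode)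

-- ===== LEMMAS AND PROOFS =====

-- accumulator lemma for the inner flatten loop
theorem pvFlattenInner_acc (ys : List String) : ∀ (used : PySem.Set String) (acc : List String),
    pvFlattenInner used acc ys = ((pvFlattenInner used [] ys).1, acc ++ (pvFlattenInner used [] ys).2) := by
  induction ys with
  | nil => intro used acc; simp [pvFlattenInner]
  | cons y ys ih =>
    intro used acc
    simp only [pvFlattenInner]
    by_cases h : PySem.Set.contains used y = true
    · rw [if_pos h, if_pos h]; exact ih used acc
    · rw [if_neg h, if_neg h, List.nil_append,
        ih (PySem.Set.add used y) (acc ++ [y]), ih (PySem.Set.add used y) [y]]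
      simp
-- accumulator lemma for the outer flatten loop
theorem pvFlattenOuter_acc (xs : List (List String)) : ∀ (used : PySem.Set String) (acc : List String),
    pvFlattenOuter used acc xs = ((pvFlattenOuter used [] xs).1, acc ++ (pvFlattenOuter used [] xs).2) := by
  induction xs with
  | nil => intro used acc; simp [pvFlattenOuter]
  | cons x xs ih =>
    intro used acc
    simp only [pvFlattenOuter, pvFlattenInner_acc x used acc]
    rw [ih (pvFlattenInner used [] x).1 (acc ++ (pvFlattenInner used [] x).2),
        ih (pvFlattenInner used [] x).1 (pvFlattenInner used [] x).2]
    simp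

-- main invariant: B's streaming pass equals flatten-then-scan from any (seen, idx) state
theorem pvGoB_eq_scan (gold : List String) :
    ∀ (nested : List (List String)) (seen : PySem.Set String) (idx : Int),
      pvGoB gold seen idx nested = pvScanA gold idx (pvFlattenOuter seen [] nested).2 := by
  intro nested
  induction nested with
  | nil => intro seen idx; simp [pvGoB, pvFlattenOuter, pvScanA]
  | cons x rest ih =>
    have inner : ∀ (ys : List String) (seen : PySem.Set String) (idx : Int),
        (match pvGroupScan gold seen idx ys with
         | Sum.inl i => i
         | Sum.inr (s, j) => pvGoB gold s j rest)
        = pvScanA gold idx ((pvFlattenInner seen [] ys).2 ++ (pvFlattenOuter (pvFlattenInner seen [] ys).1 [] rest).2) := by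
      intro ys
      induction ys with
      | nil => intro seen idx; simpa [pvGroupScan, pvFlattenInner] using ih seen idx
      | cons c cs ihc =>
        intro seen idx
        simp only [pvGroupScan, pvFlattenInner]
        by_cases h1 : PySem.Set.contains seen c = true
        · rw [if_pos h1, if_pos h1]; exact ihc seen idx
        · rw [if_neg h1, if_neg h1, List.nil_append,
            pvFlattenInner_acc cs (PySem.Set.add seen c) [c]]
          by_cases h2 : gold.contains c = true
          · rw [if_pos h2]
            simp only [List.cons_append, pvScanA]
            rw [if_pos h2]
          · rw [if_neg h2]
            simp only [List.cons_append, pvScanA, h2, if_false, Bool.false_eq_true]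
            exact ihc (PySem.Set.add seen c) (idx + 1)
    intro seen idx
    simp only [pvGoB, pvFlattenOuter]
    rw [inner x seen idx]
    rw [pvFlattenOuter_acc rest (pvFlattenInner seen [] x).1 (pvFlattenInner seen [] x).2]

-- ===== VERDICT (by name: the statement is the Claim_ definition above) =====
theorem min_hit_index_spec : Claim_equal_min_hit_index := by
  intro gold cs mode _ hpre
  show min_hit_index gold cs mode = min_hit_index_alt gold cs mode
  rcases hpre with h | h | h <;> subst h <;>
    simp only [min_hit_index, min_hit_index_alt, list_flatten, beq_iff_eq, reduceIte] <;>
    try rfl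
  exact (pvGoB_eq_scan gold cs PySem.Set.empty 0).symm
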